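-- pv_equiv track=rewrite | github.com/moonshot-cyber/agent-health-monitor | monitor.py | detect_nonce_issues
-- ===== SOURCE A (Python) =====
-- from collections import Counter
--
-- def detect_nonce_issues(transactions: list[dict]) -> tuple[int, int]:
--     """Detect nonce gaps and retry attempts."""
--     nonces = [int(tx.get("nonce", 0)) for tx in transactions]
--     if not nonces:
--         return 0, 0
--
--     # Gaps in nonce sequence
--     gaps = 0
--     unique_sorted = sorted(set(nonces))
--     for i in range(1, len(unique_sorted)):
--         gap = unique_sorted[i] - unique_sorted[i - 1] - 1
--         if gap > 0:
--             gaps += gap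
--
--     # Retries: same nonce used multiple times
--     counts = Counter(nonces)
--     retries = sum(c - 1 for c in counts.values() if c > 1)
--
--     return gaps, retries
-- ===== SOURCE B (Python) =====
-- def detect_nonce_issues(transactions: list[dict]) -> tuple[int, int]:
--     """Detect nonce gaps and retry attempts (closed form from min/max/unique count)."""
--     nonces = [int(tx.get("nonce", 0)) for tx in transactions]
--     if not nonces:
--         return 0, 0
--     k = len(set(nonces))
--     return (max(nonces) - min(nonces)) - (k - 1), len(nonces) - k
-- ===== Notes on version B (the rewrite author's own statement) =====
-- stated objective: simpler
-- what changed: Replaces sort-the-unique-nonces + index gap loop + Counter tally with a closed form: gaps telescope to (max-min)-(unique-1) and retries are n-unique, computed from set/min/max builtins.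
import Mathlib
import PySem

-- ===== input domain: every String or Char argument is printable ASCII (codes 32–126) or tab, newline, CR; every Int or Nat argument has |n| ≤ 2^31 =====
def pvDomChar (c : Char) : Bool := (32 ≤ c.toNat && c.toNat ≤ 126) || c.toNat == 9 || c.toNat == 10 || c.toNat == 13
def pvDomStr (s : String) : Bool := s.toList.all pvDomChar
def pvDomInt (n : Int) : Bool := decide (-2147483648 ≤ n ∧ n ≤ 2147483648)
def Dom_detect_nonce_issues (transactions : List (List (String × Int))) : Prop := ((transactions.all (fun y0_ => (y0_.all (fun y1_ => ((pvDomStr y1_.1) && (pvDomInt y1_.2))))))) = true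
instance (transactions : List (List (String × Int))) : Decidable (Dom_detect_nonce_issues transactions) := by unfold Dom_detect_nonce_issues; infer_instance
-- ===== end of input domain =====

-- B replaces sort-unique + index gap loop + Counter by a closed form over the nonces:
-- gaps telescope to (max-min)-(unique-1), retries = n-unique.

-- ===== PORT A =====
-- tx.get("nonce", 0); int() on an int value is the identity
def pvNonce (tx : List (String × Int)) : Int := PySem.Dict.getD (PySem.Dict.mk tx) "nonce" 0

def detect_nonce_issues (transactions : List (List (String × Int))) : Int × Int :=
  let nonces := transactions.map pvNonce
  if nonces = [] then (0, 0)
  else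
    let unique_sorted := PySem.List.sorted (PySem.Set.ofList nonces) (fun x => x)
    -- loop indices i and i-1 are always in range, so the total pyGetD is exact here
    let gaps := (PySem.List.pyRange 1 (PySem.List.len unique_sorted)).foldl
      (fun gaps i =>
        let gap := PySem.List.pyGetD unique_sorted i 0 - PySem.List.pyGetD unique_sorted (i - 1) 0 - 1
        if 0 < gap then gaps + gap else gaps) 0
    let counts := PySem.Dict.counter nonces
    let retries := ((counts.values.filter (fun c => decide (1 < c))).map (fun c => c - 1)).sum
    (gaps, retries)

-- ===== PORT B =====
-- closed form; max()/min() are guarded by the emptiness check, so .getD 0 never yields the default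
def detect_nonce_issues_alt (transactions : List (List (String × Int))) : Int × Int :=
  let nonces := transactions.map pvNonce
  if nonces = [] then (0, 0)
  else
    let k := PySem.Set.len (PySem.Set.ofList nonces)
    (((PySem.List.max? nonces (fun y => y)).getD 0 - (PySem.List.min? nonces (fun y => y)).getD 0)
       - (k - 1),
     PySem.List.len nonces - k)

-- ===== PRECONDITION & SPEC =====
def Spec_detect_nonce_issues (transactions : List (List (String × Int))) (out : Int × Int) : Prop := out = detect_nonce_issues_alt transactions
instance (transactions : List (List (String × Int))) (out : Int × Int) : Decidable (Spec_detect_nonce_issues transactions out) := by unfold Spec_detect_nonce_issues; infer_instance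

-- ===== CLAIM (what is proved, stated in full; the proofs are below) =====
def Claim_equal_detect_nonce_issues : Prop := ∀ (transactions : List (List (String × Int))), Dom_detect_nonce_issues transactions → Spec_detect_nonce_issues transactions (detect_nonce_issues transactions)

-- ===== LEMMAS AND PROOFS =====

-- A's body as a function of the nonce list
def pvAcore (ns : List Int) : Int × Int :=
  if ns = [] then (0, 0)
  else
    ((PySem.List.pyRange 1 (PySem.List.len (PySem.List.sorted (PySem.Set.ofList ns) (fun x => x)))).foldl
      (fun gaps i =>
        let gap := PySem.List.pyGetD (PySem.List.sorted (PySem.Set.ofList ns) (fun x => x)) i 0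
          - PySem.List.pyGetD (PySem.List.sorted (PySem.Set.ofList ns) (fun x => x)) (i - 1) 0 - 1
        if 0 < gap then gaps + gap else gaps) 0,
     (((PySem.Dict.counter ns).values.filter (fun c => decide (1 < c))).map (fun c => c - 1)).sum)

-- B's body as a function of the nonce list
def pvBcore (ns : List Int) : Int × Int :=
  if ns = [] then (0, 0)
  else
    (((PySem.List.max? ns (fun y => y)).getD 0 - (PySem.List.min? ns (fun y => y)).getD 0)
       - (PySem.Set.len (PySem.Set.ofList ns) - 1),
     PySem.List.len ns - PySem.Set.len (PySem.Set.ofList ns))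

theorem pvAEq (t : List (List (String × Int))) : detect_nonce_issues t = pvAcore (t.map pvNonce) := rfl

theorem pvBEq (t : List (List (String × Int))) : detect_nonce_issues_alt t = pvBcore (t.map pvNonce) := rfl

-- pyGetD on an in-range index of an append reads the left part
theorem pvGetD_append_left (s : List Int) (x : Int) (i : Int) (h0 : 0 ≤ i) (h1 : i < s.length) :
    PySem.List.pyGetD (s ++ [x]) i 0 = PySem.List.pyGetD s i 0 := by
  rw [PySem.List.pyGetD_eq_getElem _ _ h0 (by simp; omega),
      PySem.List.pyGetD_eq_getElem _ _ h0 (by exact_mod_cast h1)]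
  exact List.getElem_append_left (by omega)

-- the last element of a strictly increasing list is its maximum
theorem pvLastMax (s : List Int) (h : s ≠ []) (hp : s.Pairwise (· < ·)) :
    ∀ y ∈ s, y ≤ s.getLast h := by
  induction s with
  | nil => exact absurd rfl h
  | cons a t ih =>
      obtain ⟨h1, h2⟩ := List.pairwise_cons.mp hp
      intro y hy
      rcases List.mem_cons.mp hy with rfl | hy'
      · cases t with
        | nil => simp
        | cons b u =>
            rw [List.getLast_cons (by simp)]
            have := h1 _ (List.getLast_mem (l := b :: u) (by simp))
            omega
      · cases t with
        | nil => cases hy'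
        | cons b u =>
            rw [List.getLast_cons (by simp)]
            exact ih (by simp) h2 y hy'

-- the A gap loop on a strictly increasing nonempty list telescopes
theorem pvGapLoop (s : List Int) (h : s ≠ []) (hp : s.Pairwise (· < ·)) :
    (PySem.List.pyRange 1 (PySem.List.len s)).foldl
      (fun gaps i =>
        let gap := PySem.List.pyGetD s i 0 - PySem.List.pyGetD s (i - 1) 0 - 1
        if 0 < gap then gaps + gap else gaps) 0
    = s.getLast h - s.head h - ((s.length : Int) - 1) := by
  induction s using List.reverseRecOn with
  | nil => exact absurd rfl h
  | append_singleton s x ih =>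
      by_cases hs : s = []
      · subst hs
        simp [PySem.List.len, PySem.List.pyRange_one_eq_nil]
      · have hlen : 1 ≤ (s.length : Int) := by
          have := List.length_pos_iff.mpr hs; omega
        have hrange : PySem.List.pyRange 1 (PySem.List.len (s ++ [x]))
            = PySem.List.pyRange 1 (s.length : Int) ++ [(s.length : Int)] := by
          have hL : PySem.List.len (s ++ [x]) = (s.length : Int) + 1 := by
            simp [PySem.List.len]
          rw [hL, PySem.List.pyRange_one_succ_right hlen]
        have hpair := List.pairwise_append.mp hp
        have hps : s.Pairwise (· < ·) := hpair.1
        have hlast_lt : s.getLast hs < x :=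
          hpair.2.2 (s.getLast hs) (List.getLast_mem hs) x (by simp)
        rw [hrange, List.foldl_append]
        have hcongr : (PySem.List.pyRange 1 (s.length : Int)).foldl
            (fun gaps i =>
              let gap := PySem.List.pyGetD (s ++ [x]) i 0 - PySem.List.pyGetD (s ++ [x]) (i - 1) 0 - 1
              if 0 < gap then gaps + gap else gaps) 0
          = (PySem.List.pyRange 1 (s.length : Int)).foldl
            (fun gaps i =>
              let gap := PySem.List.pyGetD s i 0 - PySem.List.pyGetD s (i - 1) 0 - 1
              if 0 < gap then gaps + gap else gaps) 0 := by
          apply PySem.List.foldl_congr_mem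
          intro acc i hi
          rcases PySem.List.mem_pyRange_one.mp hi with ⟨hi1, hi2⟩
          rw [pvGetD_append_left s x i (by omega) hi2,
              pvGetD_append_left s x (i - 1) (by omega) (by omega)]
        have hlenEq : PySem.List.len s = (s.length : Int) := rfl
        have hihr := ih hs hps
        rw [hlenEq] at hihr
        rw [hcongr, hihr]
        simp only [List.foldl_cons, List.foldl_nil]
        have hxval : PySem.List.pyGetD (s ++ [x]) (s.length : Int) 0 = x := by
          rw [PySem.List.pyGetD_eq_getElem _ _ (by omega) (by simp)]
          simp
        have hlastval : PySem.List.pyGetD (s ++ [x]) ((s.length : Int) - 1) 0 = s.getLast hs := by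
          rw [pvGetD_append_left s x _ (by omega) (by omega)]
          rw [PySem.List.pyGetD_eq_getElem _ _ (by omega) (by omega)]
          rw [List.getLast_eq_getElem]
          congr 1
          omega
        rw [hxval, hlastval]
        have hhead : (s ++ [x]).head (by simp) = s.head hs := List.head_append_left hs
        have hlastA : (s ++ [x]).getLast (by simp) = x := by
          simp
        rw [hhead, hlastA]
        have hlen2 : ((s ++ [x]).length : Int) = (s.length : Int) + 1 := by simp
        rw [hlen2]
        split_ifs <;> omega

-- sum of (c-1) over the counts > 1 equals total - number of entries, when every count ≥ 1
theorem pvRetSum (cs : List Int) (h : ∀ c ∈ cs, 1 ≤ c) :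
    ((cs.filter (fun c => decide (1 < c))).map (fun c => c - 1)).sum = cs.sum - cs.length := by
  induction cs with
  | nil => simp
  | cons a t ih =>
      have ha : 1 ≤ a := h a (by simp)
      have ht := ih (fun c hc => h c (by simp [hc]))
      by_cases h1 : 1 < a
      · simp only [List.filter_cons, List.length_cons]
        rw [if_pos (by simpa using h1)]
        simp only [List.map_cons, List.sum_cons, List.sum_cons, ht]
        push_cast; ring
      · have ha1 : a = 1 := by omega
        simp only [List.filter_cons, List.length_cons]
        rw [if_neg (by simpa using h1)]
        rw [ht]
        simp [ha1]
        ring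

-- cast a sum of Nat-valued counts
theorem pvSumCast {α : Type} (l : List α) (g : α → Nat) :
    (l.map (fun k => ((g k : Nat) : Int))).sum = (((l.map g).sum : Nat) : Int) := by
  induction l with
  | nil => simp
  | cons a t ih => simp [ih]

-- the core equivalence, over the extracted nonce list
theorem pvCore (ns : List Int) : pvAcore ns = pvBcore ns := by
  cases ns with
  | nil => rfl
  | cons a t =>
      unfold pvAcore pvBcore
      rw [if_neg (show ¬ (a :: t = []) from by simp), if_neg (show ¬ (a :: t = []) from by simp)]
      rw [PySem.List.min?_id_cons a t, PySem.List.max?_id_cons a t]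
      set ns := a :: t with hns
      set u := PySem.Set.ofList ns with hu
      set s := PySem.List.sorted u (fun x => x) with hsrt
      have hsne : s ≠ [] := by
        rw [hsrt, Ne, PySem.List.sorted_eq_nil_iff]
        intro hc
        have : a ∈ u := (PySem.Set.mem_ofList ns a).mpr (by simp [hns])
        simp [hc] at this
      have hsp : s.Pairwise (· < ·) := PySem.List.sorted_ofList_pairwise_lt ns
      have hsperm : s.Perm u := PySem.List.sorted_perm u (fun x => x) false
      -- min = head s
      have hminEq : PySem.List.min? ns (fun y => y) = some (t.foldl min a) := PySem.List.min?_id_cons a t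
      set m := t.foldl min a with hm
      have hmMem : m ∈ ns := PySem.List.min?_mem hminEq
      have hmMin : ∀ y ∈ ns, m ≤ y := PySem.List.min?_isMin hminEq
      have hheadm : s.head hsne = m := by
        obtain ⟨hh, tl, hcons⟩ : ∃ hh tl, s = hh :: tl := by
          cases hse : s with
          | nil => exact absurd hse hsne
          | cons hh tl => exact ⟨hh, tl, rfl⟩
        have hle : ∀ y ∈ u, hh ≤ y := PySem.List.key_head_sorted_le u (fun x => x) (hsrt ▸ hcons)
        have h1 : hh ≤ m := hle m ((PySem.Set.mem_ofList ns m).mpr hmMem)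
        have hhmem : hh ∈ ns := by
          have : hh ∈ s := by simp [hcons]
          exact (PySem.Set.mem_ofList ns hh).mp (hsperm.mem_iff.mp this)
        have h2 : m ≤ hh := hmMin hh hhmem
        simp [hcons]
        omega
      -- max = last s
      have hmaxEq : PySem.List.max? ns (fun y => y) = some (t.foldl max a) := PySem.List.max?_id_cons a t
      set M := t.foldl max a with hM
      have hMMem : M ∈ ns := PySem.List.max?_mem hmaxEq
      have hMMax : ∀ y ∈ ns, y ≤ M := PySem.List.max?_isMax hmaxEq
      have hlastM : s.getLast hsne = M := by
        have h1 : s.getLast hsne ≤ M :=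
          hMMax _ ((PySem.Set.mem_ofList ns _).mp (hsperm.mem_iff.mp (List.getLast_mem hsne)))
        have h2 : M ≤ s.getLast hsne :=
          pvLastMax s hsne hsp M (hsperm.mem_iff.mpr ((PySem.Set.mem_ofList ns M).mpr hMMem))
        omega
      -- gaps
      have hgaps := pvGapLoop s hsne hsp
      have hslen : s.length = u.length := PySem.List.length_sorted u (fun x => x) false
      -- retries
      have hvals : (PySem.Dict.counter ns).values = u.map (fun k => ((ns.count k : Nat) : Int)) := by
        simp only [PySem.Dict.values, PySem.Dict.items_counter, List.map_map]
        rfl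
      have hge1 : ∀ c ∈ u.map (fun k => ((ns.count k : Nat) : Int)), 1 ≤ c := by
        intro c hc
        obtain ⟨k, hk, hck⟩ := List.mem_map.mp hc
        have hkns : k ∈ ns := (PySem.Set.mem_ofList ns k).mp hk
        have := List.count_pos_iff.mpr hkns
        omega
      have hperm : u.Perm ns.dedup := by
        refine (List.perm_ext_iff_of_nodup (PySem.Set.nodup_ofList ns) ns.nodup_dedup).mpr ?_
        intro y
        rw [PySem.Set.mem_ofList, List.mem_dedup]
      have hsum : (u.map (fun k => ((ns.count k : Nat) : Int))).sum = (ns.length : Int) := by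
        rw [pvSumCast]
        have hp2 : (u.map (fun k => ns.count k)).sum = (ns.dedup.map (fun k => ns.count k)).sum :=
          (hperm.map _).sum_eq
        rw [hp2]
        norm_cast
        exact List.sum_map_count_dedup_eq_length ns
      have hret := pvRetSum _ hge1
      rw [hvals, hret, hsum]
      have hulen : (u.map (fun k => ((ns.count k : Nat) : Int))).length = u.length := by simp
      rw [hulen, hgaps, hheadm, hlastM]
      have hklen : PySem.Set.len u = (u.length : Int) := rfl
      have hlenns : PySem.List.len ns = (ns.length : Int) := rfl
      simp only [Option.getD_some, hklen, hlenns]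
      have hsl : (s.length : Int) = (u.length : Int) := by exact_mod_cast hslen
      refine Prod.ext ?_ ?_
      · dsimp only
        omega
      · rfl

theorem pvMainEq (t : List (List (String × Int))) : detect_nonce_issues t = detect_nonce_issues_alt t := by
  rw [pvAEq, pvBEq, pvCore]

-- ===== VERDICT (by name: the statement is the Claim_ definition above) =====
theorem detect_nonce_issues_spec : Claim_equal_detect_nonce_issues := by
  intro t _
  unfold Spec_detect_nonce_issues
  exact pvMainEq t
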